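-- pv_equiv track=rewrite | github.com/happykhan/alleleatlas | alleleatlas/core/analysis.py | extract_clustering_thresholds
-- ===== SOURCE A (Python) =====
-- def extract_clustering_thresholds(results, labels):
--     """Extract and compute minimum clustering threshold from breakpoints and plateaus.
--
--     Parameters:
--         results (dict): Breakpoint analysis results containing:
--             - "chosen": list of chosen breakpoints
--             - "sil_plateaus": silhouette plateaus as (start, end) tuples
--             - "nmi_plateaus": NMI plateaus as (start, end) tuples
--         labels (list): HC threshold labels corresponding to indices
--
--     Returns:
--         tuple: (min_clustering_threshold, mst_drawing_threshold, bp_info, sil_plateaus, nmi_plateaus)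
--             - min_clustering_threshold: Recommended minimum threshold for clustering
--             - mst_drawing_threshold: Secondary threshold for MST visualization
--             - bp_info: List of breakpoint labels for reporting
--             - sil_plateaus: Silhouette plateaus
--             - nmi_plateaus: NMI plateaus
--
--     Notes:
--         - Extracts HC thresholds from chosen breakpoints
--         - Identifies minimum candidate threshold from all sources
--         - Selects second-lowest threshold for MST visualization if available
--     """
--     chosen = results.get("chosen", [])
--     sil_plateaus = results.get("sil_plateaus", [])
--     nmi_plateaus = results.get("nmi_plateaus", [])
--
--     bp_info = []
--     bp_indices = []
--
--     # Extract breakpoints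
--     for hc_level, idx, *_ in chosen:
--         hc_label = labels[idx] if (labels is not None and idx < len(labels)) else f'HC{hc_level}'
--         bp_info.append(hc_label)
--         if hc_label.startswith('HC'):
--             try:
--                 hc_value = int(hc_label[2:])
--                 bp_indices.append(hc_value)
--             except ValueError:
--                 bp_indices.append(hc_level)
--         else:
--             bp_indices.append(hc_level)
--
--     # Collect all candidate thresholds
--     all_candidate_thresholds = list(bp_indices)
--
--     all_plateaus = sil_plateaus + nmi_plateaus
--     if all_plateaus:
--         for (p_start, _) in all_plateaus:
--             p_start_label = labels[p_start] if (labels is not None and p_start < len(labels)) else f'HC{p_start*100}'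
--             if p_start_label.startswith('HC'):
--                 try:
--                     hc_value = int(p_start_label[2:])
--                     all_candidate_thresholds.append(hc_value)
--                 except ValueError:
--                     all_candidate_thresholds.append(p_start * 100)
--             else:
--                 all_candidate_thresholds.append(p_start * 100)
--
--     # Find min and second thresholds
--     min_clustering_threshold = 0
--     mst_drawing_threshold = None
--     if all_candidate_thresholds:
--         sorted_thresholds = sorted(set(all_candidate_thresholds))
--         min_clustering_threshold = sorted_thresholds[0]
--         if len(sorted_thresholds) > 1:
--             mst_drawing_threshold = sorted_thresholds[1]
--         else:
--             mst_drawing_threshold = sorted_thresholds[0]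
--
--     return min_clustering_threshold, mst_drawing_threshold, bp_info, sil_plateaus, nmi_plateaus
-- ===== SOURCE B (Python) =====
-- def extract_clustering_thresholds(results, labels):
--     """Streaming re-implementation: one shared label->threshold parser and two
--     running (distinct) minima replace the candidate list + sorted(set(...))."""
--     chosen = results.get("chosen", [])
--     sil_plateaus = results.get("sil_plateaus", [])
--     nmi_plateaus = results.get("nmi_plateaus", [])
--
--     def label_at(i, fallback):
--         if labels is not None and i < len(labels):
--             return labels[i]
--         return fallback
--
--     def threshold_of(label, fallback):
--         if label.startswith('HC'):
--             try:
--                 return int(label[2:])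
--             except ValueError:
--                 return fallback
--         return fallback
--
--     best1 = None  # smallest distinct candidate so far
--     best2 = None  # second smallest distinct candidate so far
--
--     def offer(t):
--         nonlocal best1, best2
--         if best1 is None:
--             best1 = t
--         elif t < best1:
--             best1, best2 = t, best1
--         elif t != best1 and (best2 is None or t < best2):
--             best2 = t
--
--     bp_info = []
--     for hc_level, idx, *_ in chosen:
--         lab = label_at(idx, 'HC%d' % hc_level)
--         bp_info.append(lab)
--         offer(threshold_of(lab, hc_level))
--
--     for p_start, _ in sil_plateaus:
--         offer(threshold_of(label_at(p_start, 'HC%d' % (p_start * 100)), p_start * 100))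
--     for p_start, _ in nmi_plateaus:
--         offer(threshold_of(label_at(p_start, 'HC%d' % (p_start * 100)), p_start * 100))
--
--     if best1 is None:
--         return 0, None, bp_info, sil_plateaus, nmi_plateaus
--     return best1, (best2 if best2 is not None else best1), bp_info, sil_plateaus, nmi_plateaus
-- ===== Notes on version B (the rewrite author's own statement) =====
-- stated objective: simpler
-- what changed: B factors the duplicated label->threshold parsing into one shared helper and replaces the candidate list plus sorted(set(...)) selection by a single streaming pass that maintains the smallest and second-smallest distinct thresholds in two running variables.
import Mathlib
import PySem

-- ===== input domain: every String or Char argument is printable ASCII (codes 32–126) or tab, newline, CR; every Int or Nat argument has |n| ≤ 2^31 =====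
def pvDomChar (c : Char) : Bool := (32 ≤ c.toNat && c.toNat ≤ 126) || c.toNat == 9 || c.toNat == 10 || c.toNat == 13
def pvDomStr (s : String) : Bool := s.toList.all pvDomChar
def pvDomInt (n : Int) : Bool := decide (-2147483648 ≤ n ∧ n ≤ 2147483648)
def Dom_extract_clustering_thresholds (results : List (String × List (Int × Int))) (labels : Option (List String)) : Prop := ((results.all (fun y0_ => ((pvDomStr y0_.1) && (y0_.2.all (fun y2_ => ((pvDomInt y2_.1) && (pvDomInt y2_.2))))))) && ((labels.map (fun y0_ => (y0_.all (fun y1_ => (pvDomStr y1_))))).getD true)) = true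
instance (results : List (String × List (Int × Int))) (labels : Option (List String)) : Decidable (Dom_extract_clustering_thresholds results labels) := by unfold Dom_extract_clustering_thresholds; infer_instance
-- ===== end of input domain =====

-- B replaces A's candidate list + sorted(set(...)) selection by one shared label->threshold
-- parser and a streaming pass keeping the two smallest distinct thresholds (objective: simpler).


-- ===== PORT A =====
-- results.get(key, []) — first match on the association list (String compared as List Char,
-- which the kernel evaluates fast; String's own BEq does not reduce quickly)
def pvGet (results : List (String × List (Int × Int))) (k : List Char) : List (Int × Int) :=
  match results with
  | [] => []
  | (s, v) :: rest => if s.toList = k then v else pvGet rest k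

def extract_clustering_thresholds (results : List (String × List (Int × Int))) (labels : Option (List String)) : Int × Option Int × List String × (List (Int × Int)) × (List (Int × Int)) :=
  let chosen := pvGet results "chosen".toList
  let sil_plateaus := pvGet results "sil_plateaus".toList
  let nmi_plateaus := pvGet results "nmi_plateaus".toList
  -- for hc_level, idx, *_ in chosen: build bp_info and bp_indices
  let st := chosen.foldl (fun (acc : List String × List Int) p =>
      let hc_level := p.1
      let idx := p.2
      let hc_label :=
        match labels with
        | some ls => if idx < (ls.length : Int) then PySem.List.pyGetD ls idx ("HC" ++ PySem.Int.toStr hc_level) else "HC" ++ PySem.Int.toStr hc_level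
        | none => "HC" ++ PySem.Int.toStr hc_level
      let bp_info' := acc.1 ++ [hc_label]
      let bp_indices' :=
        if PySem.Str.startswith hc_label "HC" then
          match PySem.Int.ofStr? (PySem.Str.slice hc_label (some 2) none) with
          | some v => acc.2 ++ [v]
          | none => acc.2 ++ [hc_level]
        else acc.2 ++ [hc_level]
      (bp_info', bp_indices')) ([], [])
  let bp_info := st.1
  let all_plateaus := sil_plateaus ++ nmi_plateaus
  let all_candidate_thresholds :=
    if all_plateaus ≠ [] then
      all_plateaus.foldl (fun (acc : List Int) q =>
        let p_start := q.1
        let fb := "HC" ++ PySem.Int.toStr (p_start * 100)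
        let p_start_label :=
          match labels with
          | some ls => if p_start < (ls.length : Int) then PySem.List.pyGetD ls p_start fb else fb
          | none => fb
        if PySem.Str.startswith p_start_label "HC" then
          match PySem.Int.ofStr? (PySem.Str.slice p_start_label (some 2) none) with
          | some v => acc ++ [v]
          | none => acc ++ [p_start * 100]
        else acc ++ [p_start * 100]) st.2
    else st.2
  if all_candidate_thresholds ≠ [] then
    let sorted_thresholds := PySem.List.sorted (PySem.Set.ofList all_candidate_thresholds) (fun x => x) false
    (sorted_thresholds.getD 0 0,
     some (if 1 < sorted_thresholds.length then sorted_thresholds.getD 1 0 else sorted_thresholds.getD 0 0),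
     bp_info, sil_plateaus, nmi_plateaus)
  else (0, none, bp_info, sil_plateaus, nmi_plateaus)

-- ===== PORT B =====
-- label_at(i, fallback)
def pvLabelAt (labels : Option (List String)) (i : Int) (fb : String) : String :=
  match labels with
  | some ls => if i < (ls.length : Int) then PySem.List.pyGetD ls i fb else fb
  | none => fb

-- threshold_of(label, fallback)
def pvThresholdOf (lab : String) (fb : Int) : Int :=
  if PySem.Str.startswith lab "HC" then (PySem.Int.ofStr? (PySem.Str.slice lab (some 2) none)).getD fb
  else fb

-- offer(t): maintain (smallest, second-smallest distinct) candidates seen so far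
def pvOffer (b : Option Int × Option Int) (t : Int) : Option Int × Option Int :=
  match b with
  | (none, b2) => (some t, b2)
  | (some b1, b2) =>
    if t < b1 then (some t, some b1)
    else
      -- t != best1 and (best2 is None or t < best2)
      match b2 with
      | none => if t ≠ b1 then (some b1, some t) else (some b1, none)
      | some v => if t ≠ b1 ∧ t < v then (some b1, some t) else (some b1, some v)

def extract_clustering_thresholds_alt (results : List (String × List (Int × Int))) (labels : Option (List String)) : Int × Option Int × List String × (List (Int × Int)) × (List (Int × Int)) :=
  let chosen := pvGet results "chosen".toList
  let sil_plateaus := pvGet results "sil_plateaus".toList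
  let nmi_plateaus := pvGet results "nmi_plateaus".toList
  let s1 := chosen.foldl (fun (acc : List String × (Option Int × Option Int)) p =>
      let lab := pvLabelAt labels p.2 ("HC" ++ PySem.Int.toStr p.1)
      (acc.1 ++ [lab], pvOffer acc.2 (pvThresholdOf lab p.1))) ([], (none, none))
  let bp_info := s1.1
  let best := sil_plateaus.foldl (fun b q => pvOffer b (pvThresholdOf (pvLabelAt labels q.1 ("HC" ++ PySem.Int.toStr (q.1 * 100))) (q.1 * 100))) s1.2
  let best := nmi_plateaus.foldl (fun b q => pvOffer b (pvThresholdOf (pvLabelAt labels q.1 ("HC" ++ PySem.Int.toStr (q.1 * 100))) (q.1 * 100))) best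
  match best with
  | (none, _) => (0, none, bp_info, sil_plateaus, nmi_plateaus)
  | (some b1, b2) => (b1, some (b2.getD b1), bp_info, sil_plateaus, nmi_plateaus)

-- ===== PRECONDITION & SPEC =====
-- Pre_ excludes exactly the inputs where A raises IndexError: labels present and some
-- breakpoint index / plateau start below -len(labels) (Python's labels[i] then raises).
def Pre_extract_clustering_thresholds (results : List (String × List (Int × Int))) (labels : Option (List String)) : Prop :=
  ((labels.map (fun ls =>
     ((pvGet results "chosen".toList).all (fun p => decide (-(ls.length : Int) ≤ p.2))) &&
     (((pvGet results "sil_plateaus".toList) ++ (pvGet results "nmi_plateaus".toList)).all (fun p => decide (-(ls.length : Int) ≤ p.1))))).getD true) = true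
instance (results : List (String × List (Int × Int))) (labels : Option (List String)) : Decidable (Pre_extract_clustering_thresholds results labels) := by unfold Pre_extract_clustering_thresholds; infer_instance

def pvWitness_extract_clustering_thresholds : (List (String × List (Int × Int))) × Option (List String) :=
  ([("chosen", [(3, 0), (5, 1)]), ("sil_plateaus", [(1, 2)])], some ["HC10", "HC20"])

def Spec_extract_clustering_thresholds (results : List (String × List (Int × Int))) (labels : Option (List String)) (out : Int × Option Int × List String × (List (Int × Int)) × (List (Int × Int))) : Prop := out = extract_clustering_thresholds_alt results labels
instance (results : List (String × List (Int × Int))) (labels : Option (List String)) (out : Int × Option Int × List String × (List (Int × Int)) × (List (Int × Int))) : Decidable (Spec_extract_clustering_thresholds results labels out) := by unfold Spec_extract_clustering_thresholds; infer_instance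

-- ===== CLAIM (what is proved, stated in full; the proofs are below) =====
def Claim_equal_extract_clustering_thresholds : Prop := ∀ (results : List (String × List (Int × Int))) (labels : Option (List String)), Dom_extract_clustering_thresholds results labels → Pre_extract_clustering_thresholds results labels → Spec_extract_clustering_thresholds results labels (extract_clustering_thresholds results labels)

-- ===== LEMMAS AND PROOFS =====

-- the value A appends for a chosen breakpoint / a plateau, phrased via B's helpers
def pvThrChosen (labels : Option (List String)) (p : Int × Int) : Int :=
  pvThresholdOf (pvLabelAt labels p.2 ("HC" ++ PySem.Int.toStr p.1)) p.1
def pvThrPlat (labels : Option (List String)) (q : Int × Int) : Int :=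
  pvThresholdOf (pvLabelAt labels q.1 ("HC" ++ PySem.Int.toStr (q.1 * 100))) (q.1 * 100)

-- the streaming state after seeing the multiset ts
def pvMinState (ts : List Int) : Option Int × Option Int :=
  match ts.min? with
  | none => (none, none)
  | some m => (some m, (ts.filter (fun t => decide (t ≠ m))).min?)

theorem pvMinState_none (ts : List Int) (hm : ts.min? = none) : pvMinState ts = (none, none) := by
  unfold pvMinState; rw [hm]

theorem pvMinState_some (ts : List Int) (m : Int) (hm : ts.min? = some m) :
    pvMinState ts = (some m, (ts.filter (fun t => decide (t ≠ m))).min?) := by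
  unfold pvMinState; rw [hm]

theorem pvLabelAt_eq (labels : Option (List String)) (i : Int) (fb : String) :
    (match labels with
     | some ls => if i < (ls.length : Int) then PySem.List.pyGetD ls i fb else fb
     | none => fb) = pvLabelAt labels i fb := by
  cases labels <;> rfl

theorem pvMin?_append_singleton (ts : List Int) (m t : Int) (hm : ts.min? = some m) :
    (ts ++ [t]).min? = some (min m t) := by
  obtain ⟨hmem, hle⟩ := List.min?_eq_some_iff.mp hm
  apply List.min?_eq_some_iff.mpr
  constructor
  · rcases min_choice m t with h | h <;> rw [h]
    · exact List.mem_append.mpr (Or.inl hmem)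
    · simp
  · intro b hb
    rcases List.mem_append.mp hb with hb | hb
    · exact le_trans (min_le_left m t) (hle b hb)
    · simp at hb; subst hb; exact min_le_right _ _

theorem pvOffer_step (ts : List Int) (t : Int) :
    pvOffer (pvMinState ts) t = pvMinState (ts ++ [t]) := by
  cases hm : ts.min? with
  | none =>
      have hts : ts = [] := List.min?_eq_none_iff.mp hm
      subst hts
      simp only [List.nil_append]
      rw [pvMinState_none [] rfl, pvMinState_some [t] t (by simp [List.min?])]
      simp [pvOffer, List.min?]
  | some m =>
      obtain ⟨hmem, hle⟩ := List.min?_eq_some_iff.mp hm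
      have happ := pvMin?_append_singleton ts m t hm
      rw [pvMinState_some ts m hm]
      rcases lt_trichotomy t m with ht | ht | ht
      · -- t < m : new minimum is t, second becomes m
        rw [pvMinState_some (ts ++ [t]) t (by rw [happ, min_eq_right ht.le])]
        have hfil : (ts ++ [t]).filter (fun x => decide (x ≠ t)) = ts := by
          rw [List.filter_append]
          have h1 : ts.filter (fun x => decide (x ≠ t)) = ts := by
            apply List.filter_eq_self.mpr
            intro a ha
            simp only [decide_eq_true_eq, ne_eq]
            intro he
            exact absurd (he ▸ hle a ha) (not_le.mpr ht)
          rw [h1]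
          simp
        rw [hfil, hm]
        simp [pvOffer, ht]
      · -- t = m : state unchanged
        subst ht
        rw [pvMinState_some (ts ++ [t]) t (by rw [happ, min_self])]
        have hfil : (ts ++ [t]).filter (fun x => decide (x ≠ t)) =
            ts.filter (fun x => decide (x ≠ t)) := by
          rw [List.filter_append]; simp
        rw [hfil]
        cases (ts.filter (fun x => decide (x ≠ t))).min? with
        | none => simp [pvOffer]
        | some v => simp [pvOffer]
      · -- m < t : minimum stays m, second may improve
        rw [pvMinState_some (ts ++ [t]) m (by rw [happ, min_eq_left ht.le])]
        have htne : t ≠ m := ne_of_gt ht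
        have hfil : (ts ++ [t]).filter (fun x => decide (x ≠ m)) =
            ts.filter (fun x => decide (x ≠ m)) ++ [t] := by
          rw [List.filter_append]; simp [htne]
        rw [hfil]
        cases hb : (ts.filter (fun x => decide (x ≠ m))).min? with
        | none =>
            have hnil : ts.filter (fun x => decide (x ≠ m)) = [] := List.min?_eq_none_iff.mp hb
            rw [hnil]
            simp [pvOffer, not_lt.mpr ht.le, htne, List.min?]
        | some v =>
            rw [pvMin?_append_singleton _ v t hb]
            rcases lt_or_ge t v with hv | hv
            · simp [pvOffer, not_lt.mpr ht.le, htne, hv, min_eq_right hv.le]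
            · simp [pvOffer, not_lt.mpr ht.le, htne, not_lt.mpr hv, min_eq_left hv]

theorem pvFoldl_offer (ts₀ ts : List Int) :
    ts.foldl pvOffer (pvMinState ts₀) = pvMinState (ts₀ ++ ts) := by
  induction ts generalizing ts₀ with
  | nil => simp
  | cons t ts ih =>
      have := ih (ts₀ ++ [t])
      simpa [List.foldl_cons, pvOffer_step, List.append_assoc] using this

-- A's chosen-loop fold, characterised
theorem pvChosenA (labels : Option (List String)) (chosen : List (Int × Int))
    (acc : List String × List Int) :
    chosen.foldl (fun (acc : List String × List Int) p =>
      let hc_level := p.1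
      let idx := p.2
      let hc_label :=
        match labels with
        | some ls => if idx < (ls.length : Int) then PySem.List.pyGetD ls idx ("HC" ++ PySem.Int.toStr hc_level) else "HC" ++ PySem.Int.toStr hc_level
        | none => "HC" ++ PySem.Int.toStr hc_level
      let bp_info' := acc.1 ++ [hc_label]
      let bp_indices' :=
        if PySem.Str.startswith hc_label "HC" then
          match PySem.Int.ofStr? (PySem.Str.slice hc_label (some 2) none) with
          | some v => acc.2 ++ [v]
          | none => acc.2 ++ [hc_level]
        else acc.2 ++ [hc_level]
      (bp_info', bp_indices')) acc
    = (acc.1 ++ chosen.map (fun p => pvLabelAt labels p.2 ("HC" ++ PySem.Int.toStr p.1)),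
       acc.2 ++ chosen.map (pvThrChosen labels)) := by
  induction chosen generalizing acc with
  | nil => simp
  | cons p cs ih =>
      rw [List.foldl_cons, ih]
      refine Prod.ext ?_ ?_
      · simp [pvLabelAt_eq]
      · simp only [List.map_cons, pvLabelAt_eq]
        rw [show (pvThrChosen labels p :: List.map (pvThrChosen labels) cs)
            = [pvThrChosen labels p] ++ List.map (pvThrChosen labels) cs from rfl,
          ← List.append_assoc]
        congr 1
        simp only [pvThrChosen, pvThresholdOf]
        split_ifs with hs
        · cases PySem.Int.ofStr? (PySem.Str.slice (pvLabelAt labels p.2 ("HC" ++ PySem.Int.toStr p.1)) (some 2) none) <;> simp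
        · rfl

-- A's plateau-loop fold, characterised
theorem pvPlatA (labels : Option (List String)) (plats : List (Int × Int)) (acc : List Int) :
    plats.foldl (fun (acc : List Int) q =>
        let p_start := q.1
        let fb := "HC" ++ PySem.Int.toStr (p_start * 100)
        let p_start_label :=
          match labels with
          | some ls => if p_start < (ls.length : Int) then PySem.List.pyGetD ls p_start fb else fb
          | none => fb
        if PySem.Str.startswith p_start_label "HC" then
          match PySem.Int.ofStr? (PySem.Str.slice p_start_label (some 2) none) with
          | some v => acc ++ [v]
          | none => acc ++ [p_start * 100]
        else acc ++ [p_start * 100]) acc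
    = acc ++ plats.map (pvThrPlat labels) := by
  induction plats generalizing acc with
  | nil => simp
  | cons q qs ih =>
      rw [List.foldl_cons, ih]
      simp only [List.map_cons, pvLabelAt_eq]
      rw [show (pvThrPlat labels q :: List.map (pvThrPlat labels) qs)
          = [pvThrPlat labels q] ++ List.map (pvThrPlat labels) qs from rfl,
        ← List.append_assoc]
      congr 1
      simp only [pvThrPlat, pvThresholdOf]
      split_ifs with hs
      · cases PySem.Int.ofStr? (PySem.Str.slice (pvLabelAt labels q.1 ("HC" ++ PySem.Int.toStr (q.1 * 100))) (some 2) none) <;> simp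
      · rfl

-- B's chosen-loop fold, characterised
theorem pvChosenB (labels : Option (List String)) (chosen : List (Int × Int))
    (acc : List String × (Option Int × Option Int)) :
    chosen.foldl (fun (acc : List String × (Option Int × Option Int)) p =>
      let lab := pvLabelAt labels p.2 ("HC" ++ PySem.Int.toStr p.1)
      (acc.1 ++ [lab], pvOffer acc.2 (pvThresholdOf lab p.1))) acc
    = (acc.1 ++ chosen.map (fun p => pvLabelAt labels p.2 ("HC" ++ PySem.Int.toStr p.1)),
       (chosen.map (pvThrChosen labels)).foldl pvOffer acc.2) := by
  induction chosen generalizing acc with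
  | nil => simp
  | cons p cs ih =>
      rw [List.foldl_cons, ih]
      refine Prod.ext ?_ ?_
      · simp
      · simp [pvThrChosen]

-- A's sorted(set(ts)) head/second agree with the streaming state
theorem pvSelect_some (ts : List Int) (v : Int) (b2 : Option Int)
    (h : pvMinState ts = (some v, b2)) :
    (PySem.List.sorted (PySem.Set.ofList ts) (fun x => x) false).getD 0 0 = v ∧
    (if 1 < (PySem.List.sorted (PySem.Set.ofList ts) (fun x => x) false).length
       then (PySem.List.sorted (PySem.Set.ofList ts) (fun x => x) false).getD 1 0 else v) = b2.getD v := by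
  cases hm : ts.min? with
  | none => rw [pvMinState_none ts hm] at h; cases h
  | some m =>
      rw [pvMinState_some ts m hm] at h
      obtain ⟨hmv, hb2⟩ := Prod.mk.injEq .. ▸ h
      replace hmv : m = v := Option.some.injEq .. ▸ hmv
      subst hmv
      subst hb2
      obtain ⟨hmem, hle⟩ := List.min?_eq_some_iff.mp hm
      set st := PySem.List.sorted (PySem.Set.ofList ts) (fun x => x) false with hst
      have hpw : st.Pairwise (· < ·) := PySem.List.sorted_ofList_pairwise_lt ts
      have hmemst : ∀ x, x ∈ st ↔ x ∈ ts := by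
        intro x
        rw [hst, PySem.List.mem_sorted, PySem.Set.mem_ofList]
      cases hshape : st with
      | nil =>
          exfalso
          have := (hmemst m).mpr hmem
          rw [hshape] at this
          exact absurd this List.not_mem_nil
      | cons a rest =>
          have hpw2 := List.pairwise_cons.mp (hshape ▸ hpw)
          have ham : a = m := by
            have hain : a ∈ ts := (hmemst a).mp (by rw [hshape]; exact List.mem_cons_self)
            have hmin : m ∈ st := (hmemst m).mpr hmem
            rw [hshape] at hmin
            rcases List.mem_cons.mp hmin with h' | h' 
            · exact h'.symm
            · exact le_antisymm (hpw2.1 m h').le (hle a hain)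
          subst ham
          cases hrest : rest with
          | nil =>
              have hfil : ts.filter (fun x => decide (x ≠ a)) = [] := by
                apply List.eq_nil_iff_forall_not_mem.mpr
                intro x hx
                rcases List.mem_filter.mp hx with ⟨hx1, hx2⟩
                have hxst : x ∈ st := (hmemst x).mpr hx1
                rw [hshape, hrest] at hxst
                simp at hxst hx2
                exact hx2 hxst
              rw [hfil]
              simp [List.min?]
          | cons b rest' =>
              have hbts : b ∈ ts := (hmemst b).mp (by rw [hshape, hrest]; simp)
              have hab : a < b := hpw2.1 b (by rw [hrest]; exact List.mem_cons_self)
              have hfil : (ts.filter (fun x => decide (x ≠ a))).min? = some b := by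
                apply List.min?_eq_some_iff.mpr
                constructor
                · exact List.mem_filter.mpr ⟨hbts, by simp; exact ne_of_gt hab⟩
                · intro x hx
                  rcases List.mem_filter.mp hx with ⟨hx1, hx2⟩
                  have hxst : x ∈ st := (hmemst x).mpr hx1
                  rw [hshape] at hxst
                  rcases List.mem_cons.mp hxst with h' | h' 
                  · simp at hx2; exact absurd h' hx2
                  · rw [hrest] at h' 
                    rcases List.mem_cons.mp h' with h'' | h'' 
                    · exact h''.ge
                    · exact ((List.pairwise_cons.mp (hrest ▸ hpw2.2)).1 x h'').le
              rw [hfil]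
              simp

-- ===== VERDICT (by name: the statement is the Claim_ definition above) =====
theorem extract_clustering_thresholds_spec : Claim_equal_extract_clustering_thresholds := by
  intro results labels _hdom _hpre
  unfold Spec_extract_clustering_thresholds
  unfold extract_clustering_thresholds extract_clustering_thresholds_alt
  simp only []
  rw [pvChosenA, pvChosenB, pvPlatA]
  set chosen := pvGet results "chosen".toList with hch
  set sil := pvGet results "sil_plateaus".toList with hsl
  set nmi := pvGet results "nmi_plateaus".toList with hnm
  -- candidate threshold stream
  set ts := chosen.map (pvThrChosen labels) ++ (sil ++ nmi).map (pvThrPlat labels) with hts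
  have hcand : (if (sil ++ nmi) ≠ [] then
      ([] : List Int) ++ chosen.map (pvThrChosen labels) ++ (sil ++ nmi).map (pvThrPlat labels)
      else ([] : List Int) ++ chosen.map (pvThrChosen labels)) = ts := by
    by_cases hp : (sil ++ nmi) = []
    · simp [hp, hts]
    · simp [hp, hts]
  have hsilf : ∀ (l : List (Int × Int)) (X : Option Int × Option Int),
      l.foldl (fun b q => pvOffer b (pvThresholdOf (pvLabelAt labels q.1 ("HC" ++ PySem.Int.toStr (q.1 * 100))) (q.1 * 100))) X
      = (l.map (pvThrPlat labels)).foldl pvOffer X := by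
    intro l X
    rw [List.foldl_map]
    rfl
  have hbest : (nmi.foldl (fun b q => pvOffer b (pvThresholdOf (pvLabelAt labels q.1 ("HC" ++ PySem.Int.toStr (q.1 * 100))) (q.1 * 100)))
      (sil.foldl (fun b q => pvOffer b (pvThresholdOf (pvLabelAt labels q.1 ("HC" ++ PySem.Int.toStr (q.1 * 100))) (q.1 * 100)))
        ((chosen.map (pvThrChosen labels)).foldl pvOffer (([] : List String), ((none : Option Int), (none : Option Int))).2)))
      = pvMinState ts := by
    have h0 : (([] : List String), ((none : Option Int), (none : Option Int))).2 = pvMinState [] := by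
      simp [pvMinState, List.min?]
    rw [h0, hsilf, hsilf, pvFoldl_offer, pvFoldl_offer, pvFoldl_offer]
    simp [hts, List.append_assoc]
  rw [hbest, hcand]
  cases hmin : pvMinState ts with
  | mk b1 b2 =>
      cases b1 with
      | none =>
          have h : ts = [] := by
            cases hm2 : ts.min? with
            | none => exact List.min?_eq_none_iff.mp hm2
            | some m => rw [pvMinState_some ts m hm2] at hmin; cases hmin
          rw [if_neg (by simp [h])]
      | some v =>
          have hne : ts ≠ [] := by
            intro h
            rw [pvMinState_none ts (by rw [h]; rfl)] at hmin
            cases hmin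
          obtain ⟨h1, h2⟩ := pvSelect_some ts v b2 hmin
          rw [if_pos hne, h1, h2]
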